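-- pv_equiv track=rewrite | github.com/a4ye/systematic-search-generator | src/pipeline/query_builder.py | is_noise_term
-- ===== SOURCE A (Python) =====
-- def normalize_term(term: str) -> str:
--     """Normalize whitespace, strip surrounding quotes and trailing periods."""
--     term = term.strip()
--     # Strip matched surrounding double-quotes
--     if len(term) >= 2 and term[0] == '"' and term[-1] == '"':
--         term = term[1:-1].strip()
--     # Strip trailing period (common LLM artefact)
--     if term.endswith("."):
--         term = term[:-1].strip()
--     # Collapse internal whitespace
--     term = " ".join(term.split())
--     return term
--
-- _COHORT_PREFIXES: tuple[str, ...] = (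
--     "patients with ",
--     "patients undergoing ",
--     "patients who ",
--     "patients receiving ",
--     "patients diagnosed ",
--     "people with ",
--     "people undergoing ",
--     "individuals with ",
--     "individuals undergoing ",
--     "subjects with ",
--     "adults with ",
--     "adults undergoing ",
--     "children with ",
--     "children undergoing ",
--     "women with ",
--     "women undergoing ",
--     "men with ",
--     "men undergoing ",
-- )
--
-- _NOISE_SUBSTRINGS: tuple[str, ...] = (
--     "questionnaire",
--     "survey instrument",
--     "assessment tool",
--     "rating scale",
--     "screening tool",
-- )
--
-- def is_noise_term(term: str) -> bool:
--     """Return ``True`` if the term is a cohort description or methodology/instrument term."""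
--     lower = normalize_term(term).lower()
--     if not lower:
--         return False
--     for prefix in _COHORT_PREFIXES:
--         if lower.startswith(prefix):
--             return True
--     for sub in _NOISE_SUBSTRINGS:
--         if sub in lower:
--             return True
--     return False
-- ===== SOURCE B (Python) =====
-- def normalize_term(term: str) -> str:
--     """Normalize whitespace, strip surrounding quotes and trailing periods."""
--     term = term.strip()
--     if len(term) >= 2 and term[0] == '"' and term[-1] == '"':
--         term = term[1:-1].strip()
--     if term.endswith("."):
--         term = term[:-1].strip()
--     term = " ".join(term.split())
--     return term
--
-- # Every cohort prefix is exactly two words followed by a space; since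
-- # normalization collapses whitespace, matching a prefix is the same as the
-- # first two words matching with at least one further word present.
-- _COHORT_PAIRS: frozenset[tuple[str, str]] = frozenset({
--     ("patients", "with"),
--     ("patients", "undergoing"),
--     ("patients", "who"),
--     ("patients", "receiving"),
--     ("patients", "diagnosed"),
--     ("people", "with"),
--     ("people", "undergoing"),
--     ("individuals", "with"),
--     ("individuals", "undergoing"),
--     ("subjects", "with"),
--     ("adults", "with"),
--     ("adults", "undergoing"),
--     ("children", "with"),
--     ("children", "undergoing"),
--     ("women", "with"),
--     ("women", "undergoing"),
--     ("men", "with"),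
--     ("men", "undergoing"),
-- })
--
-- _NOISE_SUBSTRINGS: tuple[str, ...] = (
--     "questionnaire",
--     "survey instrument",
--     "assessment tool",
--     "rating scale",
--     "screening tool",
-- )
--
--
-- def is_noise_term(term: str) -> bool:
--     """Return ``True`` if the term is a cohort description or methodology/instrument term."""
--     lower = normalize_term(term).lower()
--     words = lower.split()
--     if len(words) >= 3 and (words[0], words[1]) in _COHORT_PAIRS:
--         return True
--     return any(s in lower for s in _NOISE_SUBSTRINGS)
-- ===== Notes on version B (the rewrite author's own statement) =====
-- stated objective: alternative
-- what changed: B replaces A's 18 anchored startswith scans with tokenization: it splits the normalized term into words and tests the first two words against a set of cohort word-pairs (requiring at least three words), which is equivalent because normalization collapses whitespace to single spaces; the empty-string early return also disappears (no words, no substring hit).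
import Mathlib
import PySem

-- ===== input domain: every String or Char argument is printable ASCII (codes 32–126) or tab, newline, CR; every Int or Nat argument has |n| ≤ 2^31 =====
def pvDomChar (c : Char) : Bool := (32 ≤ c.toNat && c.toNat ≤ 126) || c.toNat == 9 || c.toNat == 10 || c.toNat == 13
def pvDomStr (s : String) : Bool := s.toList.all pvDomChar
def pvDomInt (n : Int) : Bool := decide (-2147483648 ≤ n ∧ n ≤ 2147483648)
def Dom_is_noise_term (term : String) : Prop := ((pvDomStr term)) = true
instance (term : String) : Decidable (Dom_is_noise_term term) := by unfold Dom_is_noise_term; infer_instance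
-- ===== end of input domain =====

-- B replaces A's 18 anchored prefix scans by tokenizing the normalized term into words and
-- looking its first two words up in a set of cohort word-pairs (objective: alternative).


-- ===== PORT A =====
-- normalize_term, identical in Source A and Source B (shared helper of both ports)
def pvNormalize (t0 : List Char) : List Char :=
  let t1 := PySem.Chars.strip t0
  let t2 := if 2 ≤ t1.length ∧ PySem.Chars.pyGet? t1 0 = some '"' ∧ PySem.Chars.pyGet? t1 (-1) = some '"'
            then PySem.Chars.strip (PySem.Chars.slice t1 (some 1) (some (-1))) else t1
  let t3 := if PySem.Chars.endswith t2 ['.']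
            then PySem.Chars.strip (PySem.Chars.slice t2 none (some (-1))) else t2
  PySem.Chars.join [' '] (PySem.Chars.split₀ t3)

def pvCohortPrefixes : List (List Char) :=
  ["patients with ".toList, "patients undergoing ".toList, "patients who ".toList,
   "patients receiving ".toList, "patients diagnosed ".toList, "people with ".toList,
   "people undergoing ".toList, "individuals with ".toList, "individuals undergoing ".toList,
   "subjects with ".toList, "adults with ".toList, "adults undergoing ".toList,
   "children with ".toList, "children undergoing ".toList, "women with ".toList,
   "women undergoing ".toList, "men with ".toList, "men undergoing ".toList]

def pvNoiseSubstrings : List (List Char) :=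
  ["questionnaire".toList, "survey instrument".toList, "assessment tool".toList,
   "rating scale".toList, "screening tool".toList]

def is_noise_term (term : String) : Bool :=
  let lower := PySem.Chars.lower (pvNormalize term.toList)
  if lower = [] then false
  else if pvCohortPrefixes.any (fun p => PySem.Chars.startswith lower p) then true
  else if pvNoiseSubstrings.any (fun sub => PySem.Chars.isIn sub lower) then true
  else false

-- ===== PORT B =====
-- _COHORT_PAIRS: frozenset of (first word, second word) pairs (distinct literals)
def pvCohortPairs : PySem.Set (List Char × List Char) :=
  [("patients".toList, "with".toList), ("patients".toList, "undergoing".toList),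
   ("patients".toList, "who".toList), ("patients".toList, "receiving".toList),
   ("patients".toList, "diagnosed".toList), ("people".toList, "with".toList),
   ("people".toList, "undergoing".toList), ("individuals".toList, "with".toList),
   ("individuals".toList, "undergoing".toList), ("subjects".toList, "with".toList),
   ("adults".toList, "with".toList), ("adults".toList, "undergoing".toList),
   ("children".toList, "with".toList), ("children".toList, "undergoing".toList),
   ("women".toList, "with".toList), ("women".toList, "undergoing".toList),
   ("men".toList, "with".toList), ("men".toList, "undergoing".toList)]

def is_noise_term_alt (term : String) : Bool :=
  let lower := PySem.Chars.lower (pvNormalize term.toList)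
  let words := PySem.Chars.split₀ lower
  -- len(words) >= 3 and (words[0], words[1]) in _COHORT_PAIRS
  let cohort := match words with
    | w1 :: w2 :: _ :: _ => pvCohortPairs.contains (w1, w2)
    | _ => false
  cohort || pvNoiseSubstrings.any (fun s => PySem.Chars.isIn s lower)

-- ===== PRECONDITION & SPEC =====
def Spec_is_noise_term (term : String) (out : Bool) : Prop := out = is_noise_term_alt term
instance (term : String) (out : Bool) : Decidable (Spec_is_noise_term term out) := by unfold Spec_is_noise_term; infer_instance

-- ===== CLAIM (what is proved, stated in full; the proofs are below) =====
def Claim_equal_is_noise_term : Prop := ∀ (term : String), Dom_is_noise_term term → Spec_is_noise_term term (is_noise_term term)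

-- ===== LEMMAS AND PROOFS =====

-- a "word": nonempty and whitespace-free (what split₀ produces)
def pvGood (w : List Char) : Prop := w ≠ [] ∧ ∀ c ∈ w, PySem.Chars.isspace c = false

-- consuming a whitespace-free block in split₀'s loop
theorem pv_go_word (w rest cur acc) (hw : ∀ c ∈ w, PySem.Chars.isspace c = false) :
    PySem.Chars.split₀.go (w ++ rest) cur acc
      = PySem.Chars.split₀.go rest (w.reverse ++ cur) acc := by
  induction w generalizing cur with
  | nil => simp
  | cons c w ih =>
      rw [List.cons_append, PySem.Chars.split₀.go, if_neg (by simp [hw c List.mem_cons_self]),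
        ih _ (fun x hx => hw x (List.mem_cons_of_mem _ hx))]
      simp

-- split₀ of a single-space join of words gives back the words
theorem pv_go_join (ws : List (List Char)) (acc : List (List Char))
    (h : ∀ w ∈ ws, pvGood w) :
    PySem.Chars.split₀.go (PySem.Chars.join [' '] ws) [] acc = acc.reverse ++ ws := by
  induction ws generalizing acc with
  | nil => simp [PySem.Chars.join_nil, PySem.Chars.split₀.go]
  | cons w ws ih =>
      obtain ⟨hw, hwsp⟩ := h w List.mem_cons_self
      cases ws with
      | nil =>
          rw [PySem.Chars.join_singleton, ← List.append_nil w, pv_go_word _ _ _ _ hwsp,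
            PySem.Chars.split₀.go]
          simp [hw]
      | cons w2 ws2 =>
          rw [PySem.Chars.join_cons_cons, List.append_assoc, pv_go_word _ _ _ _ hwsp,
            List.cons_append, List.nil_append, PySem.Chars.split₀.go,
            if_pos (by decide), if_neg (by simp [hw]),
            ih _ (fun x hx => h x (List.mem_cons_of_mem _ hx))]
          simp

theorem pv_split_join (ws : List (List Char)) (h : ∀ w ∈ ws, pvGood w) :
    PySem.Chars.split₀ (PySem.Chars.join [' '] ws) = ws := by
  rw [PySem.Chars.split₀, pv_go_join ws [] h]; rfl

-- every word split₀ produces is good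
theorem pv_go_good' (s cur acc) (hcur : ∀ c ∈ cur, PySem.Chars.isspace c = false)
    (hacc : ∀ w ∈ acc, pvGood w) :
    ∀ w ∈ PySem.Chars.split₀.go s cur acc, pvGood w := by
  induction s generalizing cur acc with
  | nil =>
      intro w hwmem
      rw [PySem.Chars.split₀.go] at hwmem
      by_cases hc : cur = []
      · rw [if_pos (by simp [hc])] at hwmem
        exact hacc w (List.mem_reverse.mp hwmem)
      · rw [if_neg (by simp [hc])] at hwmem
        rcases List.mem_cons.mp (List.mem_reverse.mp hwmem) with h | h
        · subst h
          exact ⟨by simpa using hc, fun c hcmem => hcur c (List.mem_reverse.mp hcmem)⟩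
        · exact hacc w h
  | cons c s ih =>
      intro w hwmem
      rw [PySem.Chars.split₀.go] at hwmem
      by_cases hsp : PySem.Chars.isspace c = true
      · rw [if_pos hsp] at hwmem
        by_cases hc : cur = []
        · rw [if_pos (by simp [hc])] at hwmem
          exact ih [] acc (by simp) hacc w hwmem
        · rw [if_neg (by simp [hc])] at hwmem
          refine ih [] _ (by simp) ?_ w hwmem
          intro v hv
          rcases List.mem_cons.mp hv with hv | hv
          · exact ⟨by simpa [hv] using hc, fun d hd => by
              exact hcur d (List.mem_reverse.mp (hv ▸ hd))⟩
          · exact hacc v hv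
      · rw [if_neg hsp] at hwmem
        refine ih (c :: cur) acc ?_ hacc w hwmem
        intro d hd
        rcases List.mem_cons.mp hd with hd | hd
        · simpa [hd] using hsp
        · exact hcur d hd

theorem pv_split_good (s : List Char) : ∀ w ∈ PySem.Chars.split₀ s, pvGood w :=
  pv_go_good' s [] [] (by simp) (by simp)

-- lowercasing preserves non-whitespace
theorem pv_lowerChar_not_space (c : Char) (h : PySem.Chars.isspace c = false) :
    PySem.Chars.isspace (PySem.Chars.lowerChar c) = false := by
  rw [PySem.Chars.lowerChar]
  by_cases hu : PySem.Chars.isupper c = true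
  · rw [if_pos hu]
    rw [PySem.Chars.isupper] at hu
    simp only [Bool.and_eq_true, decide_eq_true_eq, Char.le_def] at hu
    have hA : ('A').toNat = 65 := rfl
    have hZ : ('Z').toNat = 90 := rfl
    have h1 : 65 ≤ c.toNat := hA ▸ hu.1
    have h2 : c.toNat ≤ 90 := hZ ▸ hu.2
    have hv : (c.toNat + 32) < 55296 := by omega
    have htg : ∀ n : ℕ, n < 55296 → (Char.ofNat n).toNat = n := by
      intro n hn
      rw [Char.ofNat, dif_pos (Or.inl hn)]
      simp [Char.ofNatAux, Char.toNat]
    have ht : (Char.ofNat (c.toNat + 32)).toNat = c.toNat + 32 := htg _ hv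
    rw [PySem.Chars.isspace]
    simp only [ht]
    simp only [Bool.or_eq_false_iff, Bool.and_eq_false_iff, decide_eq_false_iff_not]
    omega
  · rw [if_neg hu]; exact h

theorem pv_good_lower (w : List Char) (h : pvGood w) : pvGood (PySem.Chars.lower w) := by
  obtain ⟨h1, h2⟩ := h
  refine ⟨by simp [PySem.Chars.lower, h1], ?_⟩
  intro c hc
  rw [PySem.Chars.lower] at hc
  obtain ⟨d, hd, rfl⟩ := List.mem_map.mp hc
  exact pv_lowerChar_not_space d (h2 d hd)

-- lower distributes over the single-space join
theorem pv_lower_join (ws : List (List Char)) :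
    PySem.Chars.lower (PySem.Chars.join [' '] ws)
      = PySem.Chars.join [' '] (ws.map PySem.Chars.lower) := by
  induction ws with
  | nil => simp [PySem.Chars.join_nil, PySem.Chars.lower]
  | cons w ws ih =>
      cases ws with
      | nil => simp [PySem.Chars.join_singleton]
      | cons w2 ws2 =>
          rw [PySem.Chars.join_cons_cons, List.map_cons, List.map_cons,
            PySem.Chars.join_cons_cons, ← List.map_cons, ← ih]
          simp [PySem.Chars.lower, List.map_append,
            show PySem.Chars.lowerChar ' ' = ' ' from by decide]

-- a good word contains no ' '
theorem pv_good_no_space {w : List Char} (h : pvGood w) : ' ' ∉ w := by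
  intro hmem
  have := h.2 ' ' hmem
  simp [PySem.Chars.isspace] at this

-- aligning a word against a space separator in a prefix relation
theorem pv_prefix_sep (w1 a u v : List Char) (h1 : ' ' ∉ w1) (h2 : ' ' ∉ a) :
    (w1 ++ ' ' :: u <+: a ++ ' ' :: v) ↔ (w1 = a ∧ u <+: v) := by
  induction w1 generalizing a with
  | nil =>
      cases a with
      | nil => simp [List.cons_prefix_cons]
      | cons c a' =>
          simp only [List.nil_append, List.cons_append, List.cons_prefix_cons]
          constructor
          · rintro ⟨rfl, -⟩; exact absurd List.mem_cons_self h2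
          · rintro ⟨h, -⟩; exact absurd h.symm (by simp)
  | cons x w1' ih =>
      cases a with
      | nil =>
          simp only [List.cons_append, List.nil_append, List.cons_prefix_cons]
          constructor
          · rintro ⟨rfl, -⟩; exact absurd List.mem_cons_self h1
          · rintro ⟨h, -⟩; exact absurd h (by simp)
      | cons c a' =>
          simp only [List.cons_append, List.cons_prefix_cons]
          rw [ih a' (fun hm => h1 (List.mem_cons_of_mem _ hm))
              (fun hm => h2 (List.mem_cons_of_mem _ hm))]
          constructor
          · rintro ⟨rfl, rfl, h⟩; exact ⟨rfl, h⟩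
          · rintro ⟨h, hu⟩
            injection h with hx ha
            exact ⟨hx, ha, hu⟩

-- a prefix containing ' ' cannot start a whitespace-free string
theorem pv_no_space_prefix {p s : List Char} (hp : ' ' ∈ p) (hs : ' ' ∉ s) :
    ¬ (p <+: s) := fun h => hs (h.subset hp)

-- the anchored two-word prefix test, characterized on a join of good words
theorem pv_startswith_pair (ws : List (List Char)) (hws : ∀ w ∈ ws, pvGood w)
    (p q : List Char) (hp : ' ' ∉ p) (hq : ' ' ∉ q) :
    (PySem.Chars.startswith (PySem.Chars.join [' '] ws) (p ++ ' ' :: (q ++ [' '])) = true)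
      ↔ (∃ c rest, ws = p :: q :: c :: rest) := by
  rw [PySem.Chars.startswith_iff]
  cases ws with
  | nil =>
      rw [PySem.Chars.join_nil]
      simp [List.prefix_nil]
  | cons a ws' =>
      have ha := hws a List.mem_cons_self
      cases ws' with
      | nil =>
          rw [PySem.Chars.join_singleton]
          constructor
          · intro h
            exact absurd h (pv_no_space_prefix (by simp) (pv_good_no_space ha))
          · rintro ⟨c, rest, h⟩; simp at h
      | cons b ws'' =>
          have hb := hws b (List.mem_cons_of_mem _ List.mem_cons_self)
          rw [PySem.Chars.join_cons_cons, List.append_assoc, List.singleton_append,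
            pv_prefix_sep p a _ _ hp (pv_good_no_space ha)]
          cases ws'' with
          | nil =>
              rw [PySem.Chars.join_singleton]
              constructor
              · rintro ⟨rfl, h⟩
                exact absurd h (pv_no_space_prefix (by simp) (pv_good_no_space hb))
              · rintro ⟨c, rest, h⟩; simp at h
          | cons c ws''' =>
              rw [PySem.Chars.join_cons_cons, List.append_assoc, List.singleton_append,
                show q ++ [' '] = q ++ ' ' :: [] from rfl,
                pv_prefix_sep q b _ _ hq (pv_good_no_space hb)]
              constructor
              · rintro ⟨rfl, rfl, -⟩; exact ⟨c, ws''', rfl⟩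
              · rintro ⟨c', rest', h⟩
                injection h with h1 h2
                injection h2 with h2 h3
                exact ⟨h1.symm, h2.symm, by simp⟩

-- the 18 prefixes are the encodings of the 18 pairs
theorem pv_prefixes_eq_pairs :
    pvCohortPrefixes = pvCohortPairs.map (fun pq => pq.1 ++ ' ' :: (pq.2 ++ [' '])) := by decide

theorem pv_pairs_no_space : ∀ pq ∈ pvCohortPairs, ' ' ∉ pq.1 ∧ ' ' ∉ pq.2 := by decide

-- B's first-two-words lookup, as a function of the word list
def pvPairLookup : List (List Char) → Bool
  | w1 :: w2 :: _ :: _ => pvCohortPairs.contains (w1, w2)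
  | _ => false

-- A's cohort loop equals B's pair lookup, on a join of good words
theorem pv_cohort_eq (ws : List (List Char)) (hws : ∀ w ∈ ws, pvGood w) :
    pvCohortPrefixes.any (fun p => PySem.Chars.startswith (PySem.Chars.join [' '] ws) p)
      = pvPairLookup ws := by
  rw [pv_prefixes_eq_pairs, List.any_map]
  cases ws with
  | nil =>
      simp only [pvPairLookup]
      rw [List.any_eq_false]
      intro pq hpq
      simp only [Function.comp_apply]
      rw [pv_startswith_pair [] hws pq.1 pq.2
        (pv_pairs_no_space pq hpq).1 (pv_pairs_no_space pq hpq).2]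
      rintro ⟨c, rest, h⟩; simp at h
  | cons a ws' =>
    cases ws' with
    | nil =>
        simp only [pvPairLookup]
        rw [List.any_eq_false]
        intro pq hpq
        simp only [Function.comp_apply]
        rw [pv_startswith_pair _ hws pq.1 pq.2
          (pv_pairs_no_space pq hpq).1 (pv_pairs_no_space pq hpq).2]
        rintro ⟨c, rest, h⟩; simp at h
    | cons b ws'' =>
      cases ws'' with
      | nil =>
          simp only [pvPairLookup]
          rw [List.any_eq_false]
          intro pq hpq
          simp only [Function.comp_apply]
          rw [pv_startswith_pair _ hws pq.1 pq.2
            (pv_pairs_no_space pq hpq).1 (pv_pairs_no_space pq hpq).2]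
          rintro ⟨c, rest, h⟩; simp at h
      | cons c ws''' =>
          simp only [pvPairLookup]
          rw [Bool.eq_iff_iff, List.any_eq_true]
          constructor
          · rintro ⟨pq, hpq, hsw⟩
            simp only [Function.comp_apply] at hsw
            rw [pv_startswith_pair _ hws pq.1 pq.2
              (pv_pairs_no_space pq hpq).1 (pv_pairs_no_space pq hpq).2] at hsw
            obtain ⟨c', rest', h⟩ := hsw
            injection h with h1 h2
            injection h2 with h2 h3
            subst h1; subst h2
            exact List.elem_eq_true_of_mem (by simpa using hpq)
          · intro hcont
            refine ⟨(a, b), by simpa using List.mem_of_elem_eq_true hcont, ?_⟩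
            simp only [Function.comp_apply]
            rw [pv_startswith_pair _ hws a b]
            · exact ⟨c, ws''', rfl⟩
            · exact (pv_pairs_no_space (a, b) (by simpa using List.mem_of_elem_eq_true hcont)).1
            · exact (pv_pairs_no_space (a, b) (by simpa using List.mem_of_elem_eq_true hcont)).2

-- ===== VERDICT (by name: the statement is the Claim_ definition above) =====
theorem is_noise_term_spec : Claim_equal_is_noise_term := by
  intro term _
  unfold Spec_is_noise_term is_noise_term is_noise_term_alt
  obtain ⟨s, hs⟩ : ∃ s, pvNormalize term.toList
      = PySem.Chars.join [' '] (PySem.Chars.split₀ s) := ⟨_, rfl⟩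
  have hgood : ∀ w ∈ (PySem.Chars.split₀ s).map PySem.Chars.lower, pvGood w := by
    intro w hw
    obtain ⟨v, hv, rfl⟩ := List.mem_map.mp hw
    exact pv_good_lower v (pv_split_good s v hv)
  have hlow : PySem.Chars.lower (pvNormalize term.toList)
      = PySem.Chars.join [' '] ((PySem.Chars.split₀ s).map PySem.Chars.lower) := by
    rw [hs, pv_lower_join]
  have hsplit : PySem.Chars.split₀ (PySem.Chars.lower (pvNormalize term.toList))
      = (PySem.Chars.split₀ s).map PySem.Chars.lower := by
    rw [hlow, pv_split_join _ hgood]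
  simp only [hsplit]
  simp only [hlow]
  by_cases hL : PySem.Chars.join [' '] ((PySem.Chars.split₀ s).map PySem.Chars.lower) = []
  · have hws : (PySem.Chars.split₀ s).map PySem.Chars.lower = [] := by
      rw [← pv_split_join _ hgood, hL]; rfl
    simp only [hws]
    decide
  · rw [if_neg hL, pv_cohort_eq _ hgood]
    rcases hwsf : (PySem.Chars.split₀ s).map PySem.Chars.lower
      with _ | ⟨w1, _ | ⟨w2, _ | ⟨w3, rest⟩⟩⟩ <;> simp [pvPairLookup, List.any_eq]
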